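-- pv_equiv track=rewrite | github.com/jasonmaxxxon/discourselens_26 | analysis/analyst.py | format_comments_for_context
-- ===== SOURCE A (Python) =====
-- from typing import Dict, Any, List, Optional
--
-- def get_like_count(comment: Dict[str, Any]) -> int:
--     """Return a normalized like_count field from possible sources."""
--     try:
--         return int(comment.get("like_count", comment.get("likes", 0)) or 0)
--     except Exception:
--         return 0
--
-- def format_comments_for_context(comments: List[Dict]) -> str:
--     """Formats comments to highlight HEAD vs TAIL dynamics for L3 Analysis."""
--     if not comments: return "No comments available."
--
--     # Sort by Likes (Head)
--     sorted_likes = sorted(comments, key=lambda x: get_like_count(x), reverse=True)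
--     head = sorted_likes[:10]
--
--     # Sort by Time/Index (Tail - utilizing ingestion order)
--     tail = comments[-10:] if len(comments) > 10 else []
--
--     txt = "--- [HEAD COMMENTS (Mainstream Consensus)] ---\n"
--     for c in head:
--         user = c.get('user', 'anon')
--         text = str(c.get('text', '')).replace('\n', ' ')
--         likes = get_like_count(c)
--         txt += f"- [{user}] ({likes} likes): {text}\n"
--
--     txt += "\n--- [TAIL COMMENTS (Recent/Emerging Dissent)] ---\n"
--     for c in tail:
--         user = c.get('user', 'anon')
--         text = str(c.get('text', '')).replace('\n', ' ')
--         likes = get_like_count(c)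
--         txt += f"- [{user}] ({likes} likes): {text}\n"
--
--     return txt
-- ===== SOURCE B (Python) =====
-- # B: heapq.nlargest(10) replaces the full descending sort (documented to agree with
-- # sorted(..., reverse=True)[:10] including tie order), and the text is assembled as a
-- # list of lines joined once instead of repeated string concatenation (alternative strategy,
-- # same measured cost: the per-comment key extraction dominates).
-- import heapq
-- from typing import Dict, Any, List
--
-- def get_like_count(comment: Dict[str, Any]) -> int:
--     """Return a normalized like_count field from possible sources."""
--     try:
--         return int(comment.get("like_count", comment.get("likes", 0)) or 0)
--     except Exception:
--         return 0
--
-- def _line(c: Dict) -> str: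
--     user = c.get('user', 'anon')
--     text = str(c.get('text', '')).replace('\n', ' ')
--     return f"- [{user}] ({get_like_count(c)} likes): {text}"
--
-- def format_comments_for_context(comments: List[Dict]) -> str:
--     if not comments:
--         return "No comments available."
--     head = heapq.nlargest(10, comments, key=get_like_count)
--     tail = comments[-10:] if len(comments) > 10 else []
--     lines = ["--- [HEAD COMMENTS (Mainstream Consensus)] ---"]
--     lines.extend(_line(c) for c in head)
--     lines.append("")
--     lines.append("--- [TAIL COMMENTS (Recent/Emerging Dissent)] ---")
--     lines.extend(_line(c) for c in tail)
--     return "\n".join(lines) + "\n"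
-- ===== Notes on version B (the rewrite author's own statement) =====
-- stated objective: alternative
-- what changed: B selects the top-10 liked comments with heapq.nlargest (documented to equal sorted(..., reverse=True)[:10], same tie order) instead of fully sorting all comments, and assembles the output by joining a list of lines once instead of repeated string '+=' concatenation.
import Mathlib
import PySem

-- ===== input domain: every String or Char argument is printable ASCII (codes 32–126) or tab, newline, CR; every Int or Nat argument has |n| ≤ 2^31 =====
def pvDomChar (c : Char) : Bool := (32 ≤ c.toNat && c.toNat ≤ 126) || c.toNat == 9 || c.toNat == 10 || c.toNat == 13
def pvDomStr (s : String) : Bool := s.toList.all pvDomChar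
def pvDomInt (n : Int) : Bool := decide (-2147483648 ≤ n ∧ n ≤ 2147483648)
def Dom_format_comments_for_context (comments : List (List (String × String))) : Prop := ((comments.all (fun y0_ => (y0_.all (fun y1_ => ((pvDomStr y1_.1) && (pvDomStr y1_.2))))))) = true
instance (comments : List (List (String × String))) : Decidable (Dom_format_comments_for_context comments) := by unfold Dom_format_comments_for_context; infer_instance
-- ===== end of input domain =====

-- B replaces the full descending sort by a top-10 selection (heapq.nlargest, ported by its
-- documented contract sorted(..., reverse=True)[:10]) and builds the text as a list of lines
-- joined once instead of repeated '+=' concatenation; objective: alternative (same measured cost).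

-- shared module helper: dict.get (first match in the association list)
def pvGet (d : List (String × String)) (k : String) : Option String :=
  (d.find? (fun p => p.1 == k)).map (·.2)

-- shared module helper get_like_count: int(get("like_count", get("likes", 0)) or 0), except -> 0
-- (values are strings here; '' and unparsable strings both yield 0, exactly as int() raising does)
def get_like_count (c : List (String × String)) : Int :=
  match pvGet c "like_count" with
  | some v => (PySem.Int.ofStr? v).getD 0
  | none =>
    match pvGet c "likes" with
    | some v => (PySem.Int.ofStr? v).getD 0
    | none => 0

-- ===== PORT A =====
def format_comments_for_context (comments : List (List (String × String))) : String :=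
  if comments = [] then "No comments available." else
  let sorted_likes := PySem.List.sorted comments (fun x => get_like_count x) true
  let head := PySem.List.slice sorted_likes none (some 10)
  let tail := if 10 < (comments.length : Int) then PySem.List.slice comments (some (-10)) none else []
  let txt := "--- [HEAD COMMENTS (Mainstream Consensus)] ---\n"
  let txt := head.foldl (fun acc c =>
      acc ++ "- [" ++ (pvGet c "user").getD "anon" ++ "] (" ++ PySem.Int.toStr (get_like_count c)
          ++ " likes): " ++ PySem.Str.replace ((pvGet c "text").getD "") "\n" " " ++ "\n") txt
  let txt := txt ++ "\n--- [TAIL COMMENTS (Recent/Emerging Dissent)] ---\n"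
  let txt := tail.foldl (fun acc c =>
      acc ++ "- [" ++ (pvGet c "user").getD "anon" ++ "] (" ++ PySem.Int.toStr (get_like_count c)
          ++ " likes): " ++ PySem.Str.replace ((pvGet c "text").getD "") "\n" " " ++ "\n") txt
  txt

-- ===== PORT B =====
-- B-side helper _line: one formatted line, without the trailing newline
def pvLine (c : List (String × String)) : String :=
  "- [" ++ (pvGet c "user").getD "anon" ++ "] (" ++ PySem.Int.toStr (get_like_count c)
      ++ " likes): " ++ PySem.Str.replace ((pvGet c "text").getD "") "\n" " "

def format_comments_for_context_alt (comments : List (List (String × String))) : String :=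
  if comments = [] then "No comments available." else
  -- heapq.nlargest(10, comments, key) ported by its documented contract:
  -- sorted(comments, key=key, reverse=True)[:10] (the docs guarantee this equivalence)
  let head := (PySem.List.sorted comments (fun x => get_like_count x) true).take 10
  let tail := if 10 < (comments.length : Int) then PySem.List.slice comments (some (-10)) none else []
  let lines := "--- [HEAD COMMENTS (Mainstream Consensus)] ---"
      :: (head.map pvLine
        ++ ("" :: "--- [TAIL COMMENTS (Recent/Emerging Dissent)] ---" :: tail.map pvLine))
  PySem.Str.join "\n" lines ++ "\n"

-- ===== PRECONDITION & SPEC =====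
def Spec_format_comments_for_context (comments : List (List (String × String))) (out : String) : Prop := out = format_comments_for_context_alt comments
instance (comments : List (List (String × String))) (out : String) : Decidable (Spec_format_comments_for_context comments out) := by unfold Spec_format_comments_for_context; infer_instance

-- ===== CLAIM (what is proved, stated in full; the proofs are below) =====
def Claim_equal_format_comments_for_context : Prop := ∀ (comments : List (List (String × String))), Dom_format_comments_for_context comments → Spec_format_comments_for_context comments (format_comments_for_context comments)

-- ===== LEMMAS AND PROOFS =====

-- A's '+=' loop, at the character level: init followed by one line per element
theorem pv_toList_foldl_line (g : List (String × String) → String) :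
    ∀ (l : List (List (String × String))) (init : String),
      (l.foldl (fun acc c => acc ++ g c) init).toList
        = init.toList ++ l.flatMap (fun c => (g c).toList) := by
  intro l
  induction l with
  | nil => intro init; simp
  | cons c l ih => intro init; simp [ih, String.toList_append]

-- '\n'.join of a nonempty list of parts, flattened
theorem pv_join_cons (sep : List Char) (p : List Char) (rest : List (List Char)) :
    PySem.Chars.join sep (p :: rest) = p ++ rest.flatMap (fun q => sep ++ q) := by
  induction rest generalizing p with
  | nil => simp [PySem.Chars.join_singleton]
  | cons q rest ih => simp [PySem.Chars.join_cons_cons, ih q]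

-- rotating the separator: a leading '\n' plus newline-terminated lines = '\n'-prefixed lines plus a trailing '\n'
theorem pv_rot (f : List (String × String) → List Char) (nl : List Char) :
    ∀ (l : List (List (String × String))),
      nl ++ l.flatMap (fun c => f c ++ nl) = l.flatMap (fun c => nl ++ f c) ++ nl := by
  intro l
  induction l with
  | nil => simp
  | cons c l ih => simp [ih, List.append_assoc]

-- ===== VERDICT (by name: the statement is the Claim_ definition above) =====
theorem format_comments_for_context_spec : Claim_equal_format_comments_for_context := by
  intro comments _dom
  unfold Spec_format_comments_for_context format_comments_for_context format_comments_for_context_alt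
  by_cases hc : comments = []
  · simp [hc]
  · simp only [if_neg hc]
    apply String.toList_inj.mp
    have hsl : PySem.List.slice (PySem.List.sorted comments (fun x => get_like_count x) true) none (some 10)
        = (PySem.List.sorted comments (fun x => get_like_count x) true).take 10 := by
      have := PySem.List.slice_to (PySem.List.sorted comments (fun x => get_like_count x) true) (b := 10) (by norm_num)
      simpa using this
    rw [hsl]
    set head := (PySem.List.sorted comments (fun x => get_like_count x) true).take 10 with hh
    set tail := (if 10 < (comments.length : Int) then PySem.List.slice comments (some (-10)) none else []) with ht
    have hfun : (fun (acc : String) (c : List (String × String)) =>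
        acc ++ "- [" ++ (pvGet c "user").getD "anon" ++ "] (" ++ PySem.Int.toStr (get_like_count c)
          ++ " likes): " ++ PySem.Str.replace ((pvGet c "text").getD "") "\n" " " ++ "\n")
        = (fun acc c => acc ++ (pvLine c ++ "\n")) := by
      funext acc c
      simp [pvLine, String.append_assoc]
    rw [hfun]
    rw [pv_toList_foldl_line (fun c => pvLine c ++ "\n") tail]
    rw [String.toList_append]
    rw [pv_toList_foldl_line (fun c => pvLine c ++ "\n") head]
    rw [String.toList_append, PySem.Str.toList_join]
    simp only [List.map_cons, List.map_append, List.map_map]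
    rw [pv_join_cons]
    simp only [List.flatMap_append, List.flatMap_cons]
    have e1 : ("--- [HEAD COMMENTS (Mainstream Consensus)] ---\n").toList
        = ("--- [HEAD COMMENTS (Mainstream Consensus)] ---").toList ++ ("\n").toList := by decide
    have e2 : ("\n--- [TAIL COMMENTS (Recent/Emerging Dissent)] ---\n").toList
        = ("\n").toList ++ ("--- [TAIL COMMENTS (Recent/Emerging Dissent)] ---").toList ++ ("\n").toList := by decide
    simp only [String.toList_append, e1, e2]
    have r1 := pv_rot (fun c => (pvLine c).toList) ("\n").toList head
    have r2 := pv_rot (fun c => (pvLine c).toList) ("\n").toList tail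
    calc _ = ("--- [HEAD COMMENTS (Mainstream Consensus)] ---").toList
              ++ (("\n").toList ++ head.flatMap (fun c => (pvLine c).toList ++ ("\n").toList))
              ++ ("\n").toList ++ ("--- [TAIL COMMENTS (Recent/Emerging Dissent)] ---").toList
              ++ (("\n").toList ++ tail.flatMap (fun c => (pvLine c).toList ++ ("\n").toList)) := by
          simp [List.append_assoc]
      _ = _ := by
          rw [r1, r2]; simp [List.flatMap_map, List.append_assoc]
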